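-- pv_equiv track=rewrite | github.com/USomsiadZ/Python | praktyki 2023/Panstwa/Panstwa.py | powa
-- ===== SOURCE A (Python) =====
-- powi = {'id':0,'1':'a','ida':0},{'id':0,'1':'b','ida':1},{'id':0,'1':'c','ida':2},{'id':1,'1':'aa','ida':3},{'id':1,'1':'ab','ida':4},{'id':1,'1':'ac','ida':5},{'id':2,'1':'ba','ida':6},{'id':2,'1':'bb','ida':7},{'id':2,'1':'bc','ida':8},
--
-- def powa(a):
--     xx  = 0
--     keyo = []
--     for i in powi:
--         if i['id']==a:
--             keyo.insert(xx, xx)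
--         xx = xx + 1
--     powaa = [powi[key]['1'] for key in keyo]
--     powaaid = [powi[key]['ida'] for key in keyo]
--
--     return powaa,powaaid
-- ===== SOURCE B (Python) =====
-- powi = {'id':0,'1':'a','ida':0},{'id':0,'1':'b','ida':1},{'id':0,'1':'c','ida':2},{'id':1,'1':'aa','ida':3},{'id':1,'1':'ab','ida':4},{'id':1,'1':'ac','ida':5},{'id':2,'1':'ba','ida':6},{'id':2,'1':'bb','ida':7},{'id':2,'1':'bc','ida':8},
--
-- def powa(a):
--     groups = {}
--     for row in powi:
--         names, ids = groups.setdefault(row['id'], ([], []))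
--         names.append(row['1'])
--         ids.append(row['ida'])
--     return groups.get(a, ([], []))
-- ===== Notes on version B (the rewrite author's own statement) =====
-- stated objective: alternative
-- what changed: A collects matching row indices in one loop and then runs two index-lookup comprehensions over the table; B makes a single grouping pass building a dict from id to a (names, ids) pair of lists and returns one lookup groups.get(a, ([], [])).
import Mathlib
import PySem

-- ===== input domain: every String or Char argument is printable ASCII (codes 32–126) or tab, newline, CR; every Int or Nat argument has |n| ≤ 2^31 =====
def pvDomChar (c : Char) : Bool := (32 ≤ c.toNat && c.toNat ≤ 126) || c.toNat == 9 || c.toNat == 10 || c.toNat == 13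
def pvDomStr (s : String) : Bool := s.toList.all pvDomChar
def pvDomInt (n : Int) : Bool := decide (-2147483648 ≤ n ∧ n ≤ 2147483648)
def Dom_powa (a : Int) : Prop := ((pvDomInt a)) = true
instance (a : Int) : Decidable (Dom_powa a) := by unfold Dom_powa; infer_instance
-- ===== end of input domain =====

-- B replaces A's collect-matching-indices-then-two-comprehensions with a single grouping
-- pass building an id-indexed table of (names, ids) pairs, then one lookup (objective: alternative).

-- The module-level tuple `powi` of dicts with heterogeneous values is ported by hand as a
-- list of triples (id, '1', ida); exact for this fixed literal table.
def powiRows : List (Int × String × Int) :=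
  [(0, "a", 0), (0, "b", 1), (0, "c", 2),
   (1, "aa", 3), (1, "ab", 4), (1, "ac", 5),
   (2, "ba", 6), (2, "bb", 7), (2, "bc", 8)]

-- ===== PORT A =====
-- `keyo.insert(xx, xx)` with Int position xx; `powi[key]` with key always 0..8 in range,
-- so pyGetD with a dummy default is exact here.
def powa (a : Int) : List String × List Int :=
  let st := powiRows.foldl
    (fun (st : Int × List Int) i =>
      let xx := st.1
      let keyo := st.2
      let keyo := if i.1 == a then PySem.List.insert keyo xx xx else keyo
      (xx + 1, keyo))
    ((0 : Int), ([] : List Int))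
  let keyo := st.2
  let powaa := keyo.map (fun key => (PySem.List.pyGetD powiRows key (0, "", 0)).2.1)
  let powaaid := keyo.map (fun key => (PySem.List.pyGetD powiRows key (0, "", 0)).2.2)
  (powaa, powaaid)

-- ===== PORT B =====
-- `groups.setdefault(row['id'], ([],[]))` followed by in-place appends to both lists is
-- ported as Dict.modify with default ([],[]) appending to both components.
def powa_alt (a : Int) : List String × List Int :=
  let groups := powiRows.foldl
    (fun (d : PySem.Dict Int (List String × List Int)) row =>
      d.modify row.1 (([] : List String), ([] : List Int))
        (fun p => (p.1 ++ [row.2.1], p.2 ++ [row.2.2])))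
    PySem.Dict.empty
  groups.getD a ([], [])

-- ===== PRECONDITION & SPEC =====
def Spec_powa (a : Int) (out : List String × List Int) : Prop := out = powa_alt a
instance (a : Int) (out : List String × List Int) : Decidable (Spec_powa a out) := by unfold Spec_powa; infer_instance

-- ===== CLAIM (what is proved, stated in full; the proofs are below) =====
def Claim_equal_powa : Prop := ∀ (a : Int), Dom_powa a → Spec_powa a (powa a)

-- ===== LEMMAS AND PROOFS =====
theorem powa_eq_other (a : Int) (h0 : a ≠ 0) (h1 : a ≠ 1) (h2 : a ≠ 2) :
    powa a = ([], []) := by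
  have h0' : ¬ ((0:Int) = a) := fun h => h0 h.symm
  have h1' : ¬ ((1:Int) = a) := fun h => h1 h.symm
  have h2' : ¬ ((2:Int) = a) := fun h => h2 h.symm
  simp [powa, powiRows, List.foldl, h0', h1', h2']

theorem powa_alt_other (a : Int) (h0 : a ≠ 0) (h1 : a ≠ 1) (h2 : a ≠ 2) :
    powa_alt a = ([], []) := by
  simp only [powa_alt, powiRows, List.foldl]
  rw [PySem.Dict.getD_of_not_contains]
  simp [PySem.Dict.contains_modify, PySem.Dict.contains_empty, h0, h1, h2]

-- ===== VERDICT (by name: the statement is the Claim_ definition above) =====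
theorem powa_spec : Claim_equal_powa := by
  intro a _
  unfold Spec_powa
  by_cases h0 : a = 0
  · subst h0; decide
  · by_cases h1 : a = 1
    · subst h1; decide
    · by_cases h2 : a = 2
      · subst h2; decide
      · rw [powa_eq_other a h0 h1 h2, powa_alt_other a h0 h1 h2]
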